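-- pv_equiv track=rewrite | github.com/suraj021617/-smart-4d-lottery | utils/advanced_features.py | analyze_number_gaps
-- ===== SOURCE A (Python) =====
-- from collections import Counter, defaultdict
--
-- def analyze_number_gaps(df, numbers):
--     """Analyze gaps between number appearances"""
--     gaps = {}
--     number_positions = defaultdict(list)
--
--     # Track positions of each number
--     for i, num in enumerate(numbers):
--         number_positions[num].append(i)
--
--     # Calculate gaps
--     for num, positions in number_positions.items():
--         if len(positions) > 1:
--             gaps[num] = [positions[i] - positions[i-1] for i in range(1, len(positions))]
--
--     return gaps
-- ===== SOURCE B (Python) =====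
-- def analyze_number_gaps(df, numbers):
--     """Single pass: keep [last_index, gaps_so_far] per number; no position lists,
--     no second differencing loop."""
--     state = {}
--     for i, num in enumerate(numbers):
--         e = state.get(num)
--         if e is None:
--             state[num] = [i, []]
--         else:
--             e[1].append(i - e[0])
--             e[0] = i
--     return {num: g for num, (_, g) in state.items() if g}
-- ===== Notes on version B (the rewrite author's own statement) =====
-- stated objective: simpler
-- what changed: Replaced the two-phase build-all-position-lists-then-difference algorithm by a single pass that keeps only (last index, gaps so far) per number, computing each gap on the fly.
import Mathlib
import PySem

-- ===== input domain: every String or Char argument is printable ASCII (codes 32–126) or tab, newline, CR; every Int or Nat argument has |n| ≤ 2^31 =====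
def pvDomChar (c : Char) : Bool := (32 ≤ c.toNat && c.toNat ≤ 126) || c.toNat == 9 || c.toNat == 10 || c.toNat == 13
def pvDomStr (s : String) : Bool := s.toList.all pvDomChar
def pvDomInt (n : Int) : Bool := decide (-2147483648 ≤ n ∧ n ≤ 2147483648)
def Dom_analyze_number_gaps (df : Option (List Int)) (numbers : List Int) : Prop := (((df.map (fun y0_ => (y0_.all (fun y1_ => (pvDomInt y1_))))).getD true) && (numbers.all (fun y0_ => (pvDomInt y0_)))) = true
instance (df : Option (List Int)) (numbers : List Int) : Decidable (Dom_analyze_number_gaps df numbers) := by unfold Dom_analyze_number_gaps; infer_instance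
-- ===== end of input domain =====

-- B replaces A's two-phase position-list-then-difference algorithm by a single pass keeping
-- only (last index, gaps so far) per number; objective: simpler (same O(n) cost).

-- ===== PORT A =====
-- pyGetD is exact here: the comprehension only indexes p.2 at i and i-1 with 1 ≤ i < len(p.2).
def analyze_number_gaps (df : Option (List Int)) (numbers : List Int) : List (Int × List Int) :=
  let number_positions : PySem.Dict Int (List Int) :=
    (PySem.List.enumerate numbers).foldl
      (fun d p => d.modify p.2 [] (fun v => v ++ [p.1])) PySem.Dict.empty
  let gaps : PySem.Dict Int (List Int) :=
    number_positions.items.foldl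
      (fun g p =>
        if 1 < p.2.length then
          g.insert p.1 ((PySem.List.pyRange 1 (p.2.length : Int) 1).map
            (fun i => PySem.List.pyGetD p.2 i 0 - PySem.List.pyGetD p.2 (i - 1) 0))
        else g) PySem.Dict.empty
  gaps.items

-- ===== PORT B =====
def analyze_number_gaps_alt (df : Option (List Int)) (numbers : List Int) : List (Int × List Int) :=
  let state : PySem.Dict Int (Int × List Int) :=
    (PySem.List.enumerate numbers).foldl
      (fun d p =>
        match d.get? p.2 with
        | some q => d.insert p.2 (p.1, q.2 ++ [p.1 - q.1])
        | none => d.insert p.2 (p.1, ([] : List Int))) PySem.Dict.empty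
  let res : PySem.Dict Int (List Int) :=
    state.items.foldl
      (fun g q => if q.2.2 ≠ [] then g.insert q.1 q.2.2 else g) PySem.Dict.empty
  res.items

-- ===== PRECONDITION & SPEC =====
def Spec_analyze_number_gaps (df : Option (List Int)) (numbers : List Int) (out : List (Int × List Int)) : Prop := out = analyze_number_gaps_alt df numbers
instance (df : Option (List Int)) (numbers : List Int) (out : List (Int × List Int)) : Decidable (Spec_analyze_number_gaps df numbers out) := by unfold Spec_analyze_number_gaps; infer_instance

-- ===== CLAIM (what is proved, stated in full; the proofs are below) =====
def Claim_equal_analyze_number_gaps : Prop := ∀ (df : Option (List Int)) (numbers : List Int), Dom_analyze_number_gaps df numbers → Spec_analyze_number_gaps df numbers (analyze_number_gaps df numbers)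

-- ===== LEMMAS AND PROOFS =====

/-- Adjacent differences of a list. -/
def pvDiffs : List Int → List Int
  | [] => []
  | [_] => []
  | a :: b :: t => (b - a) :: pvDiffs (b :: t)

def pvLastD (ps : List Int) : Int := ps.getLastD 0

/-- The value A's position list carries, seen through B's eyes. -/
def pvTr (p : Int × List Int) : Int × (Int × List Int) := (p.1, (pvLastD p.2, pvDiffs p.2))

lemma pvLastD_cons_cons (a b : Int) (t : List Int) :
    pvLastD (a :: b :: t) = pvLastD (b :: t) := by
  simp [pvLastD, List.getLastD_cons]

lemma pvDiffs_append (ps : List Int) (hps : ps ≠ []) (x : Int) :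
    pvDiffs (ps ++ [x]) = pvDiffs ps ++ [x - pvLastD ps] := by
  induction ps with
  | nil => cases hps rfl
  | cons a t ih =>
    cases t with
    | nil => simp [pvDiffs, pvLastD, List.getLastD]
    | cons b t' =>
      have := ih (by simp)
      simp only [List.cons_append] at this ⊢
      simp [pvDiffs, this, pvLastD_cons_cons]

lemma pvLastD_eq_getLast (q : List Int) (h : q ≠ []) : pvLastD q = q.getLast h := by
  rw [pvLastD, List.getLastD_eq_getLast?, List.getLast?_eq_getLast h]
  simp

lemma pvDiffs_ne_nil_iff (ps : List Int) : pvDiffs ps ≠ [] ↔ 1 < ps.length := by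
  match ps with
  | [] => simp [pvDiffs]
  | [a] => simp [pvDiffs]
  | a :: b :: t => simp [pvDiffs]

lemma pvGetD_append_left (ps : List Int) (x : Int) (i : Int) (h0 : 0 ≤ i)
    (h1 : i < (ps.length : Int)) :
    PySem.List.pyGetD (ps ++ [x]) i 0 = PySem.List.pyGetD ps i 0 := by
  rw [PySem.List.pyGetD_eq_getElem (ps ++ [x]) 0 h0 (by simp; omega),
      PySem.List.pyGetD_eq_getElem ps 0 h0 (by omega)]
  rw [List.getElem_append_left (by omega)]

lemma pvCompr_eq_pvDiffs (ps : List Int) :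
    (PySem.List.pyRange 1 (ps.length : Int) 1).map
      (fun i => PySem.List.pyGetD ps i 0 - PySem.List.pyGetD ps (i - 1) 0) = pvDiffs ps := by
  induction ps using List.reverseRecOn with
  | nil => simp [PySem.List.pyRange_one_eq_nil, pvDiffs]
  | append_singleton ps x ih =>
    cases ps with
    | nil => simp [PySem.List.pyRange_one_eq_nil, pvDiffs]
    | cons a t =>
      have hne : a :: t ≠ [] := by simp
      set q := a :: t with hq
      have hlen : ((q ++ [x]).length : Int) = (q.length : Int) + 1 := by simp
      rw [hlen, PySem.List.pyRange_one_succ_right (by simp only [hq, List.length_cons]; omega), List.map_append]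
      rw [pvDiffs_append q hne x]
      congr 1
      · rw [← ih]
        apply List.map_congr_left
        intro i hi
        rw [PySem.List.mem_pyRange_one] at hi
        rw [pvGetD_append_left q x i (by omega) (by omega),
            pvGetD_append_left q x (i - 1) (by omega) (by omega)]
      · simp only [List.map_cons, List.map_nil]
        congr 1
        have h1 : PySem.List.pyGetD (q ++ [x]) (q.length : Int) 0 = x := by
          rw [PySem.List.pyGetD_eq_getElem (q ++ [x]) 0 (by omega) (by simp)]
          simp
        have h2 : PySem.List.pyGetD (q ++ [x]) ((q.length : Int) - 1) 0 = pvLastD q := by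
          have hqlen : 0 < q.length := by simp [hq]
          rw [PySem.List.pyGetD_eq_getElem (q ++ [x]) 0 (by omega)
            (by simp only [List.length_append, List.length_cons, List.length_nil]; omega)]
          rw [List.getElem_append_left (by omega)]
          have hidx : ((q.length : Int) - 1).toNat = q.length - 1 := by omega
          simp only [hidx]
          rw [pvLastD_eq_getLast q hne, List.getLast_eq_getElem]
        rw [h1, h2]

lemma pvGet?_map_tr (la : List (Int × List Int)) (k : Int) :
    (PySem.Dict.mk (la.map pvTr) : PySem.Dict Int (Int × List Int)).get? k
      = ((PySem.Dict.mk la : PySem.Dict Int (List Int)).get? k).map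
          (fun ps => (pvLastD ps, pvDiffs ps)) := by
  simp only [PySem.Dict.get?, PySem.Dict.items, List.find?_map]
  have : ((fun p : Int × (Int × List Int) => p.1 == k) ∘ pvTr)
      = (fun p : Int × List Int => p.1 == k) := by
    funext p; simp [pvTr]
  rw [this]
  cases List.find? (fun p : Int × List Int => p.1 == k) la <;> simp [pvTr]

lemma pvContains_map_tr (la : List (Int × List Int)) (k : Int) :
    (PySem.Dict.mk (la.map pvTr) : PySem.Dict Int (Int × List Int)).contains k
      = (PySem.Dict.mk la : PySem.Dict Int (List Int)).contains k := by
  simp only [PySem.Dict.contains, PySem.Dict.items, List.any_map]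
  simp [Function.comp_def, pvTr]

lemma pvFold_rel (l : List (Int × Int)) (dA : PySem.Dict Int (List Int))
    (h : ∀ p ∈ dA.items, p.2 ≠ []) :
    (l.foldl
      (fun d p =>
        match d.get? p.2 with
        | some q => d.insert p.2 (p.1, q.2 ++ [p.1 - q.1])
        | none => d.insert p.2 (p.1, ([] : List Int)))
      (PySem.Dict.mk (dA.items.map pvTr)))
    = PySem.Dict.mk
        ((l.foldl (fun d p => d.modify p.2 [] (fun v => v ++ [p.1])) dA).items.map pvTr) := by
  induction l generalizing dA with
  | nil => simp
  | cons p l ih =>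
    simp only [List.foldl_cons]
    have hstep :
        (match (PySem.Dict.mk (dA.items.map pvTr)).get? p.2 with
          | some q => (PySem.Dict.mk (dA.items.map pvTr)).insert p.2 (p.1, q.2 ++ [p.1 - q.1])
          | none => (PySem.Dict.mk (dA.items.map pvTr)).insert p.2 (p.1, ([] : List Int)))
        = PySem.Dict.mk ((dA.modify p.2 [] (fun v => v ++ [p.1])).items.map pvTr) := by
      rw [pvGet?_map_tr dA.items p.2]
      rcases hA : (PySem.Dict.mk dA.items : PySem.Dict Int (List Int)).get? p.2 with _ | ps
      · -- key absent: both sides append a fresh entry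
        have hc : dA.contains p.2 = false := by
          have : (dA.get? p.2).isSome = false := by
            rw [show dA.get? p.2 = none from hA]; rfl
          rw [PySem.Dict.contains_eq_isSome_get?, this]
        have hcB : (PySem.Dict.mk (dA.items.map pvTr) : PySem.Dict Int (Int × List Int)).contains p.2 = false := by
          rw [pvContains_map_tr]; exact hc
        have hgD : dA.getD p.2 [] = [] := PySem.Dict.getD_of_not_contains _ _ hc
        simp only [Option.map_none]
        simp only [PySem.Dict.modify, PySem.Dict.insert, hc, hcB, PySem.Dict.items,
          Bool.false_eq_true, if_false, hgD]
        simp [pvTr, pvDiffs, pvLastD, List.getLastD]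
      · -- key present: both sides rewrite in place
        have hps : ps ≠ [] := by
          have hmem : (p.2, ps) ∈ dA.items := PySem.Dict.mem_items_of_get?_eq_some _ hA
          exact h _ hmem
        have hc : dA.contains p.2 = true := by
          rw [PySem.Dict.contains_eq_isSome_get?, show dA.get? p.2 = some ps from hA]; rfl
        have hcB : (PySem.Dict.mk (dA.items.map pvTr) : PySem.Dict Int (Int × List Int)).contains p.2 = true := by
          rw [pvContains_map_tr]; exact hc
        have hgD : dA.getD p.2 [] = ps := PySem.Dict.getD_of_get?_eq_some _ _ hA
        simp only [Option.map_some]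
        simp only [PySem.Dict.modify, PySem.Dict.insert, hc, hcB, PySem.Dict.items, if_true, hgD]
        congr 1
        rw [List.map_map, List.map_map]
        apply List.map_congr_left
        intro q _
        by_cases hqk : (q.1 == p.2) = true
        · simp [Function.comp, pvTr, hqk, pvDiffs_append ps hps, pvLastD]
        · simp [Function.comp, pvTr, hqk]
    rw [hstep]
    apply ih
    intro q hq
    simp only [PySem.Dict.modify, PySem.Dict.insert] at hq
    by_cases hc : dA.contains p.2 = true
    · simp only [hc, if_true, PySem.Dict.items] at hq
      rcases List.mem_map.mp hq with ⟨r, hr, hrq⟩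
      by_cases hrk : (r.1 == p.2) = true
      · simp only [hrk, if_true] at hrq
        subst hrq; simp
      · simp only [hrk, Bool.false_eq_true, if_false] at hrq
        subst hrq; exact h r hr
    · simp only [hc, Bool.false_eq_true, if_false, PySem.Dict.items, List.mem_append] at hq
      rcases hq with hq | hq
      · exact h q hq
      · simp only [List.mem_singleton] at hq
        subst hq; simp

lemma pvFoldl_filter_insert {β : Type} (cond : β → Prop) [DecidablePred cond]
    (f : β → List Int) (l : List (Int × β)) (g : PySem.Dict Int (List Int))
    (hfresh : ∀ p ∈ l, g.contains p.1 = false) (hnd : (l.map (·.1)).Nodup) :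
    (l.foldl (fun g p => if cond p.2 then g.insert p.1 (f p.2) else g) g).items
      = g.items ++ (l.filter (fun p => decide (cond p.2))).map (fun p => (p.1, f p.2)) := by
  induction l generalizing g with
  | nil => simp
  | cons p l ih =>
    simp only [List.foldl_cons, List.map_cons, List.nodup_cons] at hnd ⊢
    by_cases hc : cond p.2
    · have hgc : g.contains p.1 = false := hfresh p (by simp)
      have hins : (g.insert p.1 (f p.2)).items = g.items ++ [(p.1, f p.2)] := by
        simp [PySem.Dict.insert, hgc, PySem.Dict.items]
      rw [if_pos hc, ih (g.insert p.1 (f p.2))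
        (by
          intro q hq
          rw [PySem.Dict.contains_insert]
          have : (q.1 == p.1) = false := by
            simp only [beq_eq_false_iff_ne, ne_eq]
            intro he
            exact hnd.1 (he ▸ List.mem_map_of_mem hq)
          rw [this, Bool.false_or]
          exact hfresh q (by simp [hq]))
        hnd.2, hins]
      simp [hc]
    · rw [if_neg hc, ih g (fun q hq => hfresh q (by simp [hq])) hnd.2]
      simp [hc]

lemma pvNodup_keys_np (numbers : List Int) :
    ((PySem.List.enumerate numbers).foldl
      (fun d p => d.modify p.2 [] (fun v => v ++ [p.1]))
      (PySem.Dict.empty : PySem.Dict Int (List Int))).keys.Nodup := by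
  exact PySem.Dict.nodup_keys_foldl_modify_key _ _ _ _ _ PySem.Dict.nodup_keys_empty

-- ===== VERDICT (by name: the statement is the Claim_ definition above) =====
theorem analyze_number_gaps_spec : Claim_equal_analyze_number_gaps := by
  intro df numbers _
  show analyze_number_gaps df numbers = analyze_number_gaps_alt df numbers
  unfold analyze_number_gaps analyze_number_gaps_alt
  simp only []
  set np := (PySem.List.enumerate numbers).foldl
      (fun d p => d.modify p.2 [] (fun v => v ++ [p.1]))
      (PySem.Dict.empty : PySem.Dict Int (List Int)) with hnp
  have hval : ∀ p ∈ np.items, p.2 ≠ [] := by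
    rw [hnp]
    generalize PySem.List.enumerate numbers = l
    -- values stay nonempty through the grouping loop
    have : ∀ (l : List (Int × Int)) (d : PySem.Dict Int (List Int)),
        (∀ p ∈ d.items, p.2 ≠ []) →
        ∀ p ∈ (l.foldl (fun d p => d.modify p.2 [] (fun v => v ++ [p.1])) d).items, p.2 ≠ [] := by
      intro l
      induction l with
      | nil => intro d hd; simpa using hd
      | cons p l ih =>
        intro d hd
        simp only [List.foldl_cons]
        apply ih
        intro q hq
        simp only [PySem.Dict.modify, PySem.Dict.insert] at hq
        by_cases hc : d.contains p.2 = true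
        · simp only [hc, if_true, PySem.Dict.items] at hq
          rcases List.mem_map.mp hq with ⟨r, hr, hrq⟩
          by_cases hrk : (r.1 == p.2) = true
          · simp only [hrk, if_true] at hrq; subst hrq; simp
          · simp only [hrk, Bool.false_eq_true, if_false] at hrq; subst hrq; exact hd r hr
        · simp only [hc, Bool.false_eq_true, if_false, PySem.Dict.items, List.mem_append] at hq
          rcases hq with hq | hq
          · exact hd q hq
          · simp only [List.mem_singleton] at hq; subst hq; simp
    exact this l _ (by simp [PySem.Dict.empty, PySem.Dict.items])
  have hndk : np.keys.Nodup := pvNodup_keys_np numbers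
  -- B's grouping state is A's position dict mapped through pvTr
  have hB : (PySem.List.enumerate numbers).foldl
      (fun d p =>
        match d.get? p.2 with
        | some q => d.insert p.2 (p.1, q.2 ++ [p.1 - q.1])
        | none => d.insert p.2 (p.1, ([] : List Int)))
      (PySem.Dict.empty : PySem.Dict Int (Int × List Int))
      = PySem.Dict.mk (np.items.map pvTr) := by
    rw [hnp]
    have := pvFold_rel (PySem.List.enumerate numbers)
      (PySem.Dict.empty : PySem.Dict Int (List Int))
      (by simp [PySem.Dict.empty, PySem.Dict.items])
    simpa [PySem.Dict.empty] using this
  rw [hB]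
  -- expand both second phases
  rw [pvFoldl_filter_insert (fun ps : List Int => 1 < ps.length)
      (fun ps => (PySem.List.pyRange 1 (ps.length : Int) 1).map
        (fun i => PySem.List.pyGetD ps i 0 - PySem.List.pyGetD ps (i - 1) 0))
      np.items PySem.Dict.empty (by simp [PySem.Dict.contains_empty])
      (by simpa [PySem.Dict.keys] using hndk)]
  rw [pvFoldl_filter_insert (fun q : Int × List Int => q.2 ≠ [])
      (fun q => q.2) (np.items.map pvTr) PySem.Dict.empty
      (by simp [PySem.Dict.contains_empty])
      (by
        rw [List.map_map]
        have : ((fun p : Int × (Int × List Int) => p.1) ∘ pvTr)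
            = (fun p : Int × List Int => p.1) := by funext p; simp [pvTr]
        rw [this]
        simpa [PySem.Dict.keys] using hndk)]
  simp only [PySem.Dict.items, PySem.Dict.empty, List.nil_append]
  rw [List.filter_map, List.map_map]
  have hcond : ((fun q : Int × (Int × List Int) => decide (q.2.2 ≠ [])) ∘ pvTr)
      = (fun p : Int × List Int => decide (1 < p.2.length)) := by
    funext p
    simp only [Function.comp_apply, pvTr]
    rw [decide_eq_decide]
    exact pvDiffs_ne_nil_iff p.2
  rw [hcond]
  apply List.map_congr_left
  intro p hp
  have := pvCompr_eq_pvDiffs p.2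
  simp [pvTr, this]
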